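-- pv_equiv track=rewrite | github.com/iban-borras/informational-singularity-hypothesis | agents/rule_inferer.py | _find_overlap_composition
-- ===== SOURCE A (Python) =====
-- from typing import List, Dict, Any, Tuple, Optional, Set, Callable
--
-- def _find_overlap_composition(pattern1: str, pattern2: str) -> Optional[str]:
--     """Find overlap composition between two patterns."""
--     max_overlap = min(len(pattern1), len(pattern2)) - 1
--
--     for overlap_len in range(max_overlap, 0, -1):
--         # Provar solapament: final de pattern1 amb inici de pattern2
--         if pattern1[-overlap_len:] == pattern2[:overlap_len]:
--             return pattern1 + pattern2[overlap_len:]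
--
--         # Provar solapament: final de pattern2 amb inici de pattern1
--         if pattern2[-overlap_len:] == pattern1[:overlap_len]:
--             return pattern2 + pattern1[overlap_len:]
--
--     return None
-- ===== SOURCE B (Python) =====
-- from typing import Optional
--
--
-- def _best_overlap(s: str, t: str, cap: int) -> int:
--     """Largest k <= cap with s[-k:] == t[:k] (0 if none), via the KMP failure
--     function of t + '\x00' + s."""
--     if cap <= 0:
--         return 0
--     u = t + "\x00" + s
--     fail = [0] * len(u)
--     j = 0
--     for i in range(1, len(u)):
--         while j > 0 and u[i] != u[j]:
--             j = fail[j - 1]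
--         if u[i] == u[j]:
--             j += 1
--         fail[i] = j
--     k = fail[-1]
--     while k > cap:
--         k = fail[k - 1]
--     return k
--
--
-- def _find_overlap_composition(pattern1: str, pattern2: str) -> Optional[str]:
--     cap = min(len(pattern1), len(pattern2)) - 1
--     k1 = _best_overlap(pattern1, pattern2, cap)
--     k2 = _best_overlap(pattern2, pattern1, cap)
--     if k1 == 0 and k2 == 0:
--         return None
--     if k1 >= k2:
--         return pattern1 + pattern2[k1:]
--     return pattern2 + pattern1[k2:]
-- ===== Notes on version B (the rewrite author's own statement) =====
-- stated objective: faster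
-- what changed: A tries every overlap length from largest down, re-slicing and comparing both strings at each length (quadratic); B computes, for each direction, the KMP failure function of prefixString + '\x00' + suffixString once and walks the border chain to get the largest overlap length <= min(len)-1 in linear time, then applies A's direction tie-break (direction 1 wins ties).
import Mathlib
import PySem

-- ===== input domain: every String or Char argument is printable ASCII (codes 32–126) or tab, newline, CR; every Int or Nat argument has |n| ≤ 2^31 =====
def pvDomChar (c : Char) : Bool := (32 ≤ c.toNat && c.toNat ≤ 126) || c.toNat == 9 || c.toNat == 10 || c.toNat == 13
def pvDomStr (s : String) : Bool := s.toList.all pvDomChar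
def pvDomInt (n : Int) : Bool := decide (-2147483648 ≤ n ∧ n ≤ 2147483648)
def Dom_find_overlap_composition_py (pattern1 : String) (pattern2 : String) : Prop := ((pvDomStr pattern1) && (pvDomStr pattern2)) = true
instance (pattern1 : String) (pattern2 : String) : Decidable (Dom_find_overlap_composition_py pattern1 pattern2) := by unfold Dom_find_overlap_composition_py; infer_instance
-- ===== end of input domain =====

-- B replaces A's quadratic descending scan over overlap lengths by a linear KMP
-- failure-function computation (longest prefix-suffix borders), keeping A's
-- exact value including the direction tie-break.


-- ===== PORT A =====
-- The loop 'for overlap_len in range(max_overlap, 0, -1)' with early returns becomes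
-- the obvious descending structural recursion (argument = overlap_len).  The slices
-- pattern1[-k:] and pattern2[:k] are taken with 1 ≤ k < length, where they are exactly
-- List.drop (length - k) and List.take k.
def pyAChecks (p1 p2 : List Char) : Nat → Option (List Char)
  | 0 => none
  | k+1 =>
    if p1.drop (p1.length - (k+1)) = p2.take (k+1) then some (p1 ++ p2.drop (k+1))
    else if p2.drop (p2.length - (k+1)) = p1.take (k+1) then some (p2 ++ p1.drop (k+1))
    else pyAChecks p1 p2 k

def find_overlap_composition_py (pattern1 : String) (pattern2 : String) : Option String :=
  let p1 := pattern1.toList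
  let p2 := pattern2.toList
  let maxOverlap : Int := min p1.length p2.length - 1
  -- range(max_overlap, 0, -1) performs max(max_overlap, 0) = maxOverlap.toNat iterations
  (pyAChecks p1 p2 maxOverlap.toNat).map String.ofList

-- ===== PORT B =====
-- Port of Source B.  The inner 'while j > 0 and u[i] != u[j]: j = fail[j-1]' is ported with
-- fuel = the entry value of j (each iteration strictly decreases j, so that fuel always
-- suffices).  Python's preallocated 'fail = [0]*len(u)' written left to right is modelled
-- by a list grown by appends; reads use getD _ 0, which returns exactly the preallocated 0
-- on not-yet-written positions.
def kmpDescend (u : List Char) (fail : List Nat) (c : Char) : Nat → Nat → Nat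
  | 0, j => j
  | fuel+1, j =>
    if 0 < j ∧ c ≠ u.getD j ' ' then kmpDescend u fail c fuel (fail.getD (j-1) 0)
    else j

def kmpStep (u : List Char) (st : List Nat × Nat) (i : Nat) : List Nat × Nat :=
  let c := u.getD i ' '
  let j1 := kmpDescend u st.1 c st.2 st.2
  let j2 := if c = u.getD j1 ' ' then j1 + 1 else j1
  (st.1 ++ [j2], j2)

def kmpFail (u : List Char) : List Nat :=
  ((List.range' 1 (u.length - 1)).foldl (kmpStep u) ([0], 0)).1

def bestOverlap (s t : List Char) (cap : Int) : Nat :=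
  if cap ≤ 0 then 0
  else
    let u := t ++ Char.ofNat 0 :: s          -- t + "\x00" + s
    let fail := kmpFail u
    let k := fail.getD (u.length - 1) 0      -- fail[-1]; u is nonempty here
    walkDown fail cap.toNat k k
where
  -- 'while k > cap: k = fail[k-1]' with fuel = entry k (k strictly decreases)
  walkDown (fail : List Nat) (cap : Nat) : Nat → Nat → Nat
    | 0, k => k
    | fuel+1, k => if cap < k then walkDown fail cap fuel (fail.getD (k-1) 0) else k

def find_overlap_composition_py_alt (pattern1 : String) (pattern2 : String) : Option String :=
  let p1 := pattern1.toList
  let p2 := pattern2.toList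
  let cap : Int := min p1.length p2.length - 1
  let k1 := bestOverlap p1 p2 cap
  let k2 := bestOverlap p2 p1 cap
  if k1 = 0 ∧ k2 = 0 then none
  else if k2 ≤ k1 then some (String.ofList (p1 ++ p2.drop k1))
  else some (String.ofList (p2 ++ p1.drop k2))

-- ===== PRECONDITION & SPEC =====
def Spec_find_overlap_composition_py (pattern1 : String) (pattern2 : String) (out : Option String) : Prop := out = find_overlap_composition_py_alt pattern1 pattern2
instance (pattern1 : String) (pattern2 : String) (out : Option String) : Decidable (Spec_find_overlap_composition_py pattern1 pattern2 out) := by unfold Spec_find_overlap_composition_py; infer_instance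

-- ===== CLAIM (what is proved, stated in full; the proofs are below) =====
def Claim_equal_find_overlap_composition_py : Prop := ∀ (pattern1 : String) (pattern2 : String), Dom_find_overlap_composition_py pattern1 pattern2 → Spec_find_overlap_composition_py pattern1 pattern2 (find_overlap_composition_py pattern1 pattern2)

-- ===== LEMMAS AND PROOFS =====

-- l is a proper border of v: a prefix of length l that is also a suffix
def borderB (v : List Char) (l : Nat) : Bool :=
  decide (l < v.length) && (v.take l == v.drop (v.length - l))

-- largest k with 1 ≤ k ≤ n and f k, else 0
def bestUpTo (f : Nat → Bool) : Nat → Nat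
  | 0 => 0
  | n+1 => if f (n+1) then n+1 else bestUpTo f n

def maxBorder (v : List Char) : Nat := bestUpTo (borderB v) (v.length - 1)

-- the overlap test: t[:l] == s[-l:]
def matchB (s t : List Char) (l : Nat) : Bool := t.take l == s.drop (s.length - l)

def combineK (p1 p2 : List Char) (k1 k2 : Nat) : Option (List Char) :=
  if k1 = 0 ∧ k2 = 0 then none
  else if k2 ≤ k1 then some (p1 ++ p2.drop k1)
  else some (p2 ++ p1.drop k2)

theorem bestUpTo_le (f : Nat → Bool) (n : Nat) : bestUpTo f n ≤ n := by
  induction n with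
  | zero => simp [bestUpTo]
  | succ n ih => simp only [bestUpTo]; split <;> omega

theorem bestUpTo_holds (f : Nat → Bool) (n : Nat) (h : bestUpTo f n ≠ 0) :
    f (bestUpTo f n) = true := by
  induction n with
  | zero => simp [bestUpTo] at h
  | succ n ih =>
    simp only [bestUpTo] at *
    split at h
    case isTrue hf => rw [if_pos hf]; exact hf
    case isFalse hf => rw [if_neg hf]; exact ih h

theorem bestUpTo_max (f : Nat → Bool) (n m : Nat) (h1 : bestUpTo f n < m) (h2 : m ≤ n) :
    f m = false := by
  induction n with
  | zero => omega
  | succ n ih =>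
    simp only [bestUpTo] at h1
    split at h1
    · omega
    · rcases Nat.lt_or_ge m (n+1) with hm | hm
      · exact ih h1 (by omega)
      · have : m = n+1 := by omega
        subst this; simpa using ‹¬ f (n+1) = true›

theorem bestUpTo_eq (f : Nat → Bool) (n k : Nat) (hk : k = 0 ∨ f k = true) (hle : k ≤ n)
    (hmax : ∀ m, k < m → m ≤ n → f m = false) : bestUpTo f n = k := by
  induction n with
  | zero => simp [bestUpTo]; omega
  | succ n ih =>
    simp only [bestUpTo]
    by_cases h : f (n+1) = true
    · have : ¬ k < n+1 := fun hlt => by simp [hmax _ hlt (le_refl _)] at h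
      rw [if_pos h]; omega
    · rw [if_neg h]
      rcases Nat.lt_or_ge k (n+1) with hm | hm
      · exact ih (by omega) (fun m h1 h2 => hmax m h1 (by omega))
      · have : k = n+1 := by omega
        subst this; rcases hk with h0 | hf
        · omega
        · exact absurd hf h
  
theorem bestUpTo_drop_top (f : Nat → Bool) (n k : Nat) (hk : k ≤ n)
    (h : ∀ m, k < m → m ≤ n → f m = false) : bestUpTo f n = bestUpTo f k := by
  induction n with
  | zero => have : k = 0 := by omega
            subst this; rfl
  | succ n ih =>
    rcases Nat.lt_or_ge k (n+1) with hm | hm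
    · simp only [bestUpTo]
      rw [if_neg (by simp [h (n+1) hm (le_refl _)])]
      exact ih (by omega) (fun m h1 h2 => h m h1 (by omega))
    · have : k = n+1 := by omega
      subst this; rfl

theorem bestUpTo_congr (f g : Nat → Bool) (n : Nat) (h : ∀ m, 0 < m → m ≤ n → f m = g m) :
    bestUpTo f n = bestUpTo g n := by
  induction n with
  | zero => rfl
  | succ n ih =>
    simp only [bestUpTo]
    rw [h (n+1) (by omega) (le_refl _)]
    rw [ih (fun m h1 h2 => h m h1 (by omega))]

theorem borderB_lt {v : List Char} {l : Nat} (h : borderB v l = true) : l < v.length := by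
  simp [borderB] at h; exact h.1

theorem borderB_eq {v : List Char} {l : Nat} (h : borderB v l = true) :
    v.take l = v.drop (v.length - l) := by
  simp [borderB] at h; exact h.2

theorem borderB_intro {v : List Char} {l : Nat} (h1 : l < v.length)
    (h2 : v.take l = v.drop (v.length - l)) : borderB v l = true := by
  simp [borderB, h1, h2]

theorem borderB_zero {v : List Char} (h : v ≠ []) : borderB v 0 = true := by
  apply borderB_intro
  · cases v with
    | nil => simp at h
    | cons a t => simp
  · simp

theorem borderB_take {v : List Char} {b l : Nat} (hb : borderB v b = true)
    (hl : borderB v l = true) (hlt : l < b) : borderB (v.take b) l = true := by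
  have hbl := borderB_lt hb
  have hll := borderB_lt hl
  apply borderB_intro
  · simp [List.length_take]; omega
  · rw [List.take_take, List.length_take]
    have h1 : min l b = l := by omega
    have h2 : min b v.length - l = b - l := by omega
    rw [h1, h2, borderB_eq hb, List.drop_drop]
    have : v.length - b + (b - l) = v.length - l := by omega
    rw [this, ← borderB_eq hl]

theorem borderB_of_take {v : List Char} {b l : Nat} (hb : borderB v b = true)
    (hl : borderB (v.take b) l = true) : borderB v l = true := by
  have hbl := borderB_lt hb
  have hll := borderB_lt hl
  rw [List.length_take] at hll
  apply borderB_intro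
  · omega
  · have h2 := borderB_eq hl
    rw [List.take_take, List.length_take] at h2
    have h1 : min l b = l := by omega
    have h3 : min b v.length - l = b - l := by omega
    rw [h1, h3, borderB_eq hb, List.drop_drop] at h2
    have : v.length - b + (b - l) = v.length - l := by omega
    rw [this] at h2
    exact h2

theorem maxBorder_border {v : List Char} (h : v ≠ []) : borderB v (maxBorder v) = true := by
  by_cases h0 : maxBorder v = 0
  · rw [h0]; exact borderB_zero h
  · exact bestUpTo_holds _ _ h0

theorem maxBorder_ge {v : List Char} {l : Nat} (h : borderB v l = true) : l ≤ maxBorder v := by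
  by_contra hc
  have hlt := borderB_lt h
  have := bestUpTo_max (borderB v) (v.length - 1) l (by unfold maxBorder at hc; omega) (by omega)
  simp [this] at h

theorem maxBorder_le (v : List Char) : maxBorder v ≤ v.length - 1 := bestUpTo_le _ _

theorem borderB_snoc_succ {v : List Char} {c : Char} {l : Nat} (h : l < v.length) :
    borderB (v ++ [c]) (l+1) = (borderB v l && (v.getD l ' ' == c)) := by
  have hlen : (v ++ [c]).length = v.length + 1 := by simp
  have htake : (v ++ [c]).take (l+1) = v.take (l+1) := List.take_append_of_le_length (by omega)
  have hdrop : (v ++ [c]).drop (v.length + 1 - (l+1)) = v.drop (v.length - l) ++ [c] := by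
    rw [List.drop_append_of_le_length (by omega)]
    have : v.length + 1 - (l+1) = v.length - l := by omega
    rw [this]
  simp only [borderB, hlen, htake, hdrop]
  rw [List.take_add_one]
  have hget : v[l]? = some (v.getD l ' ') := by
    rw [List.getD_eq_getElem?_getD, List.getElem?_eq_getElem h]; rfl
  rw [hget]
  simp only [Option.toList]
  have hd1 : decide (l + 1 < v.length + 1) = true := decide_eq_true (by omega)
  have hd2 : decide (l < v.length) = true := decide_eq_true h
  rw [hd1, hd2]
  simp only [Bool.true_and]
  by_cases hb : v.take l = v.drop (v.length - l) ∧ v.getD l ' ' = c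
  · rw [hb.1, hb.2]; simp
  · rcases Decidable.not_and_iff_or_not.mp hb with h1 | h1
    · have : ¬ (v.take l ++ [v.getD l ' '] = v.drop (v.length - l) ++ [c]) := by
        intro he
        exact h1 (List.append_inj_left he (by simp [List.length_take, List.length_drop]; omega))
      simp
    · have : ¬ (v.take l ++ [v.getD l ' '] = v.drop (v.length - l) ++ [c]) := by
        intro he
        have := List.append_inj_right he (by simp [List.length_take, List.length_drop]; omega)
        simp at this; exact h1 this
      simp

theorem getD_take_eq (u : List Char) (n l : Nat) (h : l < n) (d : Char) :
    (u.take n).getD l d = u.getD l d := by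
  simp [List.getD_eq_getElem?_getD, h]

-- the new-entry computation of one kmpStep, under correctness of the previous entries
theorem kmpDescend_spec (u : List Char) (F : List Nat) (i : Nat) (c : Char)
    (hi : i ≤ u.length)
    (hF : ∀ m, m < i → F.getD m 0 = maxBorder (u.take (m+1)))
    (fuel j : Nat) (hfuel : j ≤ fuel) (hj : borderB (u.take i) j = true) :
    kmpDescend u F c fuel j
      = bestUpTo (fun l => borderB (u.take i) l && (u.getD l ' ' == c)) j := by
  induction fuel generalizing j with
  | zero =>
    have : j = 0 := by omega
    subst this; rfl
  | succ fuel ih =>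
    have hjlt : j < i := by
      have := borderB_lt hj
      simp [List.length_take] at this
      omega
    simp only [kmpDescend]
    by_cases hcond : 0 < j ∧ c ≠ u.getD j ' '
    · rw [if_pos hcond]
      obtain ⟨hj0, hcne⟩ := hcond
      have hFj : F.getD (j-1) 0 = maxBorder (u.take j) := by
        have := hF (j-1) (by omega)
        rwa [Nat.sub_add_cancel (by omega)] at this
      have htk : u.take j = (u.take i).take j := by
        rw [List.take_take]
        congr 1
        omega
      have hne : u.take j ≠ [] := by
        have : (u.take j).length = j := by simp [List.length_take]; omega
        intro hnil
        rw [hnil] at this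
        simp at this
        omega
      have hb' : borderB (u.take i) (F.getD (j-1) 0) = true := by
        rw [hFj]
        apply borderB_of_take hj
        rw [htk] at hne ⊢
        exact maxBorder_border hne
      have hlt' : F.getD (j-1) 0 ≤ j - 1 := by
        rw [hFj]
        have := maxBorder_le (u.take j)
        simp [List.length_take] at this
        omega
      rw [ih (F.getD (j-1) 0) (by omega) hb']
      symm
      apply bestUpTo_drop_top _ j (F.getD (j-1) 0) (by omega)
      intro m h1 h2
      by_contra hg
      rw [Bool.not_eq_false, Bool.and_eq_true, beq_iff_eq] at hg
      obtain ⟨hbm, hcm⟩ := hg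
      rcases Nat.lt_or_ge m j with hmj | hmj
      · have : borderB ((u.take i).take j) m = true := borderB_take hj hbm hmj
        rw [← htk] at this
        have := maxBorder_ge this
        omega
      · have : m = j := by omega
        subst this
        exact hcne hcm.symm
    · rw [if_neg hcond]
      rcases Nat.eq_zero_or_pos j with h0 | h0
      · subst h0; rfl
      · have hceq : c = u.getD j ' ' := by
          by_contra hne
          exact hcond ⟨h0, hne⟩
        symm
        apply bestUpTo_eq _ j j _ (le_refl _) (by omega)
        right
        rw [Bool.and_eq_true, beq_iff_eq]
        exact ⟨hj, hceq.symm⟩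

theorem kmpStep_newval (u : List Char) (F : List Nat) (i j : Nat)
    (hi1 : 1 ≤ i) (hi : i < u.length)
    (hF : ∀ m, m < i → F.getD m 0 = maxBorder (u.take (m+1)))
    (hj : j = maxBorder (u.take i)) :
    (kmpStep u (F, j) i).2 = maxBorder (u.take (i+1)) := by
  have hvlen : (u.take i).length = i := by simp [List.length_take]; omega
  have hvne : u.take i ≠ [] := by
    intro hnil; rw [hnil] at hvlen; simp at hvlen; omega
  have hjb : borderB (u.take i) j = true := hj ▸ maxBorder_border hvne
  have hjle : j ≤ i - 1 := by
    have := maxBorder_le (u.take i); rw [hvlen] at this; omega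
  set c := u.getD i ' ' with hc
  have hr := kmpDescend_spec u F i c (by omega) hF j j (le_refl _) hjb
  set G : Nat → Bool := fun l => borderB (u.take i) l && (u.getD l ' ' == c) with hG
  set r := bestUpTo G j with hrdef
  have hrle : r ≤ j := bestUpTo_le _ _
  have hGmax : ∀ m, r < m → G m = false := by
    intro m hm
    rcases Nat.lt_or_ge j m with hmj | hmj
    · by_contra hg
      rw [Bool.not_eq_false, hG, Bool.and_eq_true] at hg
      have := maxBorder_ge hg.1
      omega
    · exact bestUpTo_max G j m (by omega) hmj
  have htake1 : u.take (i+1) = u.take i ++ [c] := by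
    rw [List.take_add_one]
    congr 1
    rw [List.getElem?_eq_getElem hi]
    simp [hc, List.getD_eq_getElem?_getD, List.getElem?_eq_getElem hi]
  have hflen : (u.take (i+1)).length = i + 1 := by simp [List.length_take]; omega
  have hext : ∀ l, l < i → borderB (u.take (i+1)) (l+1) = G l := by
    intro l hl
    rw [htake1, borderB_snoc_succ (by omega : l < (u.take i).length), hG]
    simp only []
    congr 1
    rw [getD_take_eq u i l hl]
  have hmb : maxBorder (u.take (i+1)) = bestUpTo (borderB (u.take (i+1))) i := by
    unfold maxBorder; rw [hflen]; rfl
  have hstep : (kmpStep u (F, j) i).2 = if c = u.getD (kmpDescend u F c j j) ' ' then kmpDescend u F c j j + 1 else kmpDescend u F c j j := rfl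
  rw [hstep, hr, hmb]
  rcases Nat.eq_zero_or_pos r with hr0 | hr0
  · rw [hr0]
    by_cases h0c : c = u.getD 0 ' '
    · rw [if_pos h0c]
      symm
      apply bestUpTo_eq _ i 1 _ hi1
      · intro m h1 h2
        have hm : m - 1 + 1 = m := by omega
        rw [← hm, hext (m-1) (by omega)]
        exact hGmax (m-1) (by omega)
      · right
        rw [hext 0 (by omega), hG]
        simp only [Bool.and_eq_true, beq_iff_eq]
        exact ⟨borderB_zero hvne, h0c.symm⟩
    · rw [if_neg h0c]
      symm
      apply bestUpTo_eq _ i 0 (Or.inl rfl) (by omega)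
      intro m h1 h2
      have hm : m - 1 + 1 = m := by omega
      rw [← hm, hext (m-1) (by omega)]
      rcases Nat.eq_zero_or_pos (m-1) with hm0 | hm0
      · rw [hm0, hG]
        simp only [Bool.and_eq_false_iff]
        right
        rw [beq_eq_false_iff_ne]
        exact fun he => h0c he.symm
      · exact hGmax (m-1) (by omega)
  · have hGr : G r = true := bestUpTo_holds G j (by omega)
    have hrc : u.getD r ' ' = c := by
      rw [hG] at hGr
      simp only [Bool.and_eq_true, beq_iff_eq] at hGr
      exact hGr.2
    rw [if_pos hrc.symm]
    symm
    apply bestUpTo_eq _ i (r+1) _ (by omega)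
    · intro m h1 h2
      have hm : m - 1 + 1 = m := by omega
      rw [← hm, hext (m-1) (by omega)]
      exact hGmax (m-1) (by omega)
    · right
      rw [hext r (by omega)]
      exact hGr

theorem kmpLoop_inv (u : List Char) (h1 : 1 ≤ u.length) (t : Nat) (ht : t ≤ u.length - 1) :
    (List.range' 1 t).foldl (kmpStep u) ([0], 0)
      = ((List.range (t+1)).map (fun m => maxBorder (u.take (m+1))), maxBorder (u.take (t+1))) := by
  induction t with
  | zero =>
    have hm1 : maxBorder (u.take 1) = 0 := by
      unfold maxBorder
      have : (u.take 1).length = 1 := by simp [List.length_take]; omega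
      rw [this]
      rfl
    simp [hm1]
  | succ t ih =>
    rw [List.range'_1_concat, List.foldl_append, ih (by omega)]
    simp only [List.foldl_cons, List.foldl_nil]
    have hnew := kmpStep_newval u ((List.range (t+1)).map (fun m => maxBorder (u.take (m+1))))
      (t+1) (maxBorder (u.take (t+1))) (by omega) (by omega)
      (fun m hm => PySem.List.getD_map_range _ _ _ _ hm) rfl
    have hfst : ∀ st i, kmpStep u st i = (st.1 ++ [(kmpStep u st i).2], (kmpStep u st i).2) := by
      intro st i; rfl
    rw [hfst]
    have h1t : 1 + t = t + 1 := by omega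
    rw [h1t, hnew]
    have : (List.range (t+2)).map (fun m => maxBorder (u.take (m+1)))
        = (List.range (t+1)).map (fun m => maxBorder (u.take (m+1))) ++ [maxBorder (u.take (t+2))] := by
      rw [List.range_succ, List.map_append]
      rfl
    rw [this]

theorem kmpFail_spec (u : List Char) (h1 : 1 ≤ u.length) (m : Nat) (hm : m < u.length) :
    (kmpFail u).getD m 0 = maxBorder (u.take (m+1)) := by
  unfold kmpFail
  rw [kmpLoop_inv u h1 (u.length - 1) (le_refl _)]
  have : u.length - 1 + 1 = u.length := by omega
  rw [this]
  exact PySem.List.getD_map_range _ _ _ _ hm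

theorem walkDown_spec (u : List Char) (F : List Nat) (cap : Nat)
    (hF : ∀ m, m < u.length → F.getD m 0 = maxBorder (u.take (m+1)))
    (fuel k : Nat) (hfuel : k ≤ fuel) (hk : borderB u k = true)
    (hmax : ∀ l, borderB u l = true → l ≤ cap → l ≤ k) :
    bestOverlap.walkDown F cap fuel k = bestUpTo (borderB u) cap := by
  induction fuel generalizing k with
  | zero =>
    have hk0 : k = 0 := by omega
    subst hk0
    simp only [bestOverlap.walkDown]
    symm
    apply bestUpTo_eq _ cap 0 (Or.inl rfl) (by omega)
    intro m hm1 hm2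
    by_contra hb
    rw [Bool.not_eq_false] at hb
    have := hmax m hb hm2
    omega
  | succ fuel ih =>
    simp only [bestOverlap.walkDown]
    by_cases hck : cap < k
    · rw [if_pos hck]
      have hklt : k < u.length := borderB_lt hk
      have hFk : F.getD (k-1) 0 = maxBorder (u.take k) := by
        have := hF (k-1) (by omega)
        rwa [Nat.sub_add_cancel (by omega)] at this
      have hlen : (u.take k).length = k := by simp [List.length_take]; omega
      have hne : u.take k ≠ [] := by
        intro hnil; rw [hnil] at hlen; simp at hlen; omega
      have hk' : borderB u (F.getD (k-1) 0) = true := by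
        rw [hFk]
        exact borderB_of_take hk (maxBorder_border hne)
      have hle' : F.getD (k-1) 0 ≤ k - 1 := by
        rw [hFk]
        have := maxBorder_le (u.take k)
        omega
      apply ih _ (by omega) hk'
      intro l hl hlc
      have hlk : l < k := by omega
      have : borderB (u.take k) l = true := borderB_take hk hl hlk
      rw [hFk]
      exact maxBorder_ge this
    · rw [if_neg hck]
      symm
      apply bestUpTo_eq _ cap k (Or.inr hk) (by omega)
      intro m hm1 hm2
      by_contra hb
      rw [Bool.not_eq_false] at hb
      have := hmax m hb hm2
      omega

theorem borderB_sep (s t : List Char) (cap l : Nat) (hl : l ≤ cap)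
    (h1 : cap + 1 ≤ s.length) (h2 : cap + 1 ≤ t.length) :
    borderB (t ++ Char.ofNat 0 :: s) l = matchB s t l := by
  have hulen : (t ++ Char.ofNat 0 :: s).length = t.length + (s.length + 1) := by simp
  have htake : (t ++ Char.ofNat 0 :: s).take l = t.take l :=
    List.take_append_of_le_length (by omega)
  have hdrop : (t ++ Char.ofNat 0 :: s).drop ((t ++ Char.ofNat 0 :: s).length - l)
      = s.drop (s.length - l) := by
    rw [hulen]
    have he : t.length + (s.length + 1) - l = t.length + (s.length + 1 - l) := by omega
    rw [he, List.drop_append]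
    have hz : t.drop (t.length + (s.length + 1 - l)) = [] := List.drop_eq_nil_of_le (by omega)
    have hh : t.length + (s.length + 1 - l) - t.length = (s.length - l) + 1 := by omega
    rw [hz, hh, List.nil_append]
    rfl
  unfold borderB matchB
  rw [htake, hdrop]
  have : decide (l < (t ++ Char.ofNat 0 :: s).length) = true := decide_eq_true (by rw [hulen]; omega)
  rw [this, Bool.true_and]

theorem bestOverlap_eq (s t : List Char) (cap : Int)
    (hcap : cap ≤ min s.length t.length - 1) :
    bestOverlap s t cap = bestUpTo (matchB s t) cap.toNat := by
  unfold bestOverlap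
  by_cases hc : cap ≤ 0
  · rw [if_pos hc]
    have : cap.toNat = 0 := Int.toNat_of_nonpos hc
    rw [this]
    rfl
  · rw [if_neg hc]
    have hcpos : 0 < cap := by omega
    have hcast : (cap.toNat : Int) = cap := Int.toNat_of_nonneg (by omega)
    have hs : cap.toNat + 1 ≤ s.length := by omega
    have htl : cap.toNat + 1 ≤ t.length := by omega
    set u := t ++ Char.ofNat 0 :: s with hu
    have hulen : u.length = t.length + (s.length + 1) := by simp [hu]
    have h1 : 1 ≤ u.length := by omega
    have hune : u ≠ [] := by
      intro hnil
      rw [hnil] at hulen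
      simp at hulen
    have hF := kmpFail_spec u h1
    have hlast : (kmpFail u).getD (u.length - 1) 0 = maxBorder u := by
      rw [hF (u.length - 1) (by omega), Nat.sub_add_cancel h1, List.take_length]
    show bestOverlap.walkDown (kmpFail u) cap.toNat ((kmpFail u).getD (u.length - 1) 0)
      ((kmpFail u).getD (u.length - 1) 0) = bestUpTo (matchB s t) cap.toNat
    rw [hlast]
    rw [walkDown_spec u (kmpFail u) cap.toNat hF (maxBorder u) (maxBorder u) (le_refl _)
      (maxBorder_border hune) (fun l hl _ => maxBorder_ge hl)]
    apply bestUpTo_congr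
    intro m hm1 hm2
    exact borderB_sep s t cap.toNat m hm2 hs htl

theorem pyAChecks_eq (p1 p2 : List Char) (n : Nat) :
    pyAChecks p1 p2 n = combineK p1 p2 (bestUpTo (matchB p1 p2) n) (bestUpTo (matchB p2 p1) n) := by
  induction n with
  | zero => rfl
  | succ n ih =>
    by_cases hm1 : p1.drop (p1.length - (n+1)) = p2.take (n+1)
    · have hb1 : matchB p1 p2 (n+1) = true := by
        unfold matchB; rw [beq_iff_eq]; exact hm1.symm
      have e1 : bestUpTo (matchB p1 p2) (n+1) = n+1 := by
        simp [bestUpTo, hb1]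
      rw [e1]
      simp only [pyAChecks]
      rw [if_pos hm1]
      unfold combineK
      rw [if_neg (by omega : ¬ (n+1 = 0 ∧ bestUpTo (matchB p2 p1) (n+1) = 0))]
      rw [if_pos (bestUpTo_le _ (n+1))]
    · have hb1 : matchB p1 p2 (n+1) = false := by
        unfold matchB
        rw [beq_eq_false_iff_ne]
        exact fun he => hm1 he.symm
      have e1 : bestUpTo (matchB p1 p2) (n+1) = bestUpTo (matchB p1 p2) n := by
        simp [bestUpTo, hb1]
      by_cases hm2 : p2.drop (p2.length - (n+1)) = p1.take (n+1)
      · have hb2 : matchB p2 p1 (n+1) = true := by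
          unfold matchB; rw [beq_iff_eq]; exact hm2.symm
        have e2 : bestUpTo (matchB p2 p1) (n+1) = n+1 := by
          simp [bestUpTo, hb2]
        rw [e1, e2]
        simp only [pyAChecks]
        rw [if_neg hm1, if_pos hm2]
        unfold combineK
        have hle := bestUpTo_le (matchB p1 p2) n
        rw [if_neg (by omega : ¬ (bestUpTo (matchB p1 p2) n = 0 ∧ n+1 = 0))]
        rw [if_neg (by omega : ¬ (n+1 ≤ bestUpTo (matchB p1 p2) n))]
      · have hb2 : matchB p2 p1 (n+1) = false := by
          unfold matchB
          rw [beq_eq_false_iff_ne]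
          exact fun he => hm2 he.symm
        have e2 : bestUpTo (matchB p2 p1) (n+1) = bestUpTo (matchB p2 p1) n := by
          simp [bestUpTo, hb2]
        rw [e1, e2]
        simp only [pyAChecks]
        rw [if_neg hm1, if_neg hm2]
        exact ih

-- ===== VERDICT (by name: the statement is the Claim_ definition above) =====
theorem main_eq (p1 p2 : List Char) :
    Option.map String.ofList
        (pyAChecks p1 p2 ((((min p1.length p2.length : Nat) : Int) - 1).toNat))
      = if bestOverlap p1 p2 (((min p1.length p2.length : Nat) : Int) - 1) = 0
           ∧ bestOverlap p2 p1 (((min p1.length p2.length : Nat) : Int) - 1) = 0 then none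
        else if bestOverlap p2 p1 (((min p1.length p2.length : Nat) : Int) - 1)
                  ≤ bestOverlap p1 p2 (((min p1.length p2.length : Nat) : Int) - 1) then
          some (String.ofList (p1 ++ List.drop (bestOverlap p1 p2 (((min p1.length p2.length : Nat) : Int) - 1)) p2))
        else
          some (String.ofList (p2 ++ List.drop (bestOverlap p2 p1 (((min p1.length p2.length : Nat) : Int) - 1)) p1)) := by
  rw [bestOverlap_eq p1 p2 _ (le_refl _)]
  rw [bestOverlap_eq p2 p1 _ (by rw [Nat.min_comm p2.length p1.length])]
  rw [pyAChecks_eq]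
  unfold combineK
  split_ifs <;> simp

-- ===== VERDICT (by name: the statement is the Claim_ definition above) =====
theorem find_overlap_composition_py_spec : Claim_equal_find_overlap_composition_py := by
  intro pattern1 pattern2 _
  exact main_eq pattern1.toList pattern2.toList
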